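-- pv_equiv track=rewrite | github.com/juampiludu/FAMAF | Segundo Año/1C/AyED2/Práctico/Práctico3.1/practico31.py | cook_time
-- ===== SOURCE A (Python) =====
-- def cook_time(pieces : list()):
--     sum_t = 0
--     open_count = 0
--     pieces_aux = pieces.copy()
--     while (len(pieces_aux) > 0):
--         curr_min_t = get_min_t(pieces_aux)
--         if sum_t == curr_min_t:
--             pieces_aux = drop_p(sum_t, pieces_aux)
--             open_count += 1
--         else:
--             sum_t += 1
--     return open_count
--
-- def drop_p(t_min : int(), pieces : list()) -> list():
--     pieces_aux = pieces.copy()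
--     for i in pieces:
--         if t_min == i[0]:
--             pieces_aux.remove(i)
--     return pieces_aux
--
-- def get_min_t(pieces : list()) -> int():
--     min = pieces[0][0]
--     for i in range(1, len(pieces)):
--         min = pieces[i][0] if pieces[i][0] < min else min
--     return min
-- ===== SOURCE B (Python) =====
-- def cook_time(pieces : list()):
--     keys = sorted(p[0] for p in pieces)
--     if not keys:
--         return 0
--     return 1 + sum(1 for prev, cur in zip(keys, keys[1:]) if prev != cur)
-- ===== Notes on version B (the rewrite author's own statement) =====
-- stated objective: simpler
-- what changed: Replaces A's repeated min-scan-and-remove while-loop (with its drop_p/get_min_t helpers) by a single sort of the first elements followed by one linear pass counting adjacent differences.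
import Mathlib
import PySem

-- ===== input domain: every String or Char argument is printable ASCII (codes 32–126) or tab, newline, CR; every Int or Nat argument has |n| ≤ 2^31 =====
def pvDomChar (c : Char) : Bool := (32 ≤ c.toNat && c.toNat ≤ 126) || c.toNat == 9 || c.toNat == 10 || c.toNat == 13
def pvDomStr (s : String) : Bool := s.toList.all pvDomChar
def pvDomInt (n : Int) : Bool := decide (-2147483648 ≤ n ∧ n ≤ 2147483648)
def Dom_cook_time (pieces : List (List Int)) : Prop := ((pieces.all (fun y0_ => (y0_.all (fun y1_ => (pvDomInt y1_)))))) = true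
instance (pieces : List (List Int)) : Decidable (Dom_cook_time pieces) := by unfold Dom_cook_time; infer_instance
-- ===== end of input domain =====

-- B replaces A's repeated min-scan-and-remove loop by sort-then-one-pass adjacent-difference counting; Pre_ excludes inputs where Python A raises (an empty piece) or never terminates (a negative first element).


-- ===== PORT A =====
-- get_min_t: min := pieces[0][0]; for i in range(1, len(pieces)): keep the smaller of min and pieces[i][0]
-- (pyGetD is exact here: every index read is in range wherever Python returns; Pre_ excludes the IndexError inputs)
def get_min_t (pieces : List (List Int)) : Int :=
  (PySem.List.pyRange 1 (PySem.List.len pieces) 1).foldl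
    (fun mn i =>
      if PySem.List.pyGetD (PySem.List.pyGetD pieces i []) 0 0 < mn then
        PySem.List.pyGetD (PySem.List.pyGetD pieces i []) 0 0
      else mn)
    (PySem.List.pyGetD (PySem.List.pyGetD pieces 0 []) 0 0)

-- drop_p: pieces_aux = pieces.copy(); for i in pieces: if t_min == i[0]: pieces_aux.remove(i)
def drop_p (t_min : Int) (pieces : List (List Int)) : List (List Int) :=
  pieces.foldl
    (fun acc i =>
      if t_min == PySem.List.pyGetD i 0 0 then (PySem.List.remove? acc i).getD acc else acc)
    pieces

-- the while loop of cook_time, with fuel (the while loop has no bound in Python and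
-- diverges on a negative first element — those inputs are outside Pre_; the fuel passed
-- below is proved sufficient on Pre_ in loopA_correct/cook_time_eq_card)
def cook_time_loop (fuel : Nat) (sum_t : Int) (rest : List (List Int)) (open_count : Int) : Int :=
  match fuel with
  | 0 => open_count
  | fuel + 1 =>
    if rest.length > 0 then
      let curr_min_t := get_min_t rest
      if sum_t == curr_min_t then
        cook_time_loop fuel sum_t (drop_p sum_t rest) (open_count + 1)
      else
        cook_time_loop fuel (sum_t + 1) rest open_count
    else open_count

def cook_time (pieces : List (List Int)) : Int :=
  cook_time_loop
    (pieces.length + (pieces.map (fun p => (PySem.List.pyGetD p 0 0).natAbs)).sum + 1)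
    0 pieces 0

-- ===== PORT B =====
-- keys = sorted(p[0] for p in pieces); 0 if empty, else 1 + one pass counting adjacent differences
def cook_time_alt (pieces : List (List Int)) : Int :=
  let keys := PySem.List.sorted (pieces.map (fun p => PySem.List.pyGetD p 0 0)) (fun x => x) false
  match keys with
  | [] => 0
  | _ :: _ =>
    1 + (((keys.zip (PySem.List.slice keys (some 1) none)).filter
            (fun ab => !(ab.1 == ab.2))).length : Int)

-- ===== PRECONDITION & SPEC =====
-- Pre_ excludes exactly the inputs on which Python A does not return: an empty piece
-- (IndexError on i[0] / pieces[i][0]) or a negative first element (sum_t starts at 0 and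
-- only grows, so it never meets the minimum and the while loop diverges).
def Pre_cook_time (pieces : List (List Int)) : Prop :=
  ∀ p ∈ pieces, p ≠ [] ∧ 0 ≤ p.headD 0
instance (pieces : List (List Int)) : Decidable (Pre_cook_time pieces) := by
  unfold Pre_cook_time; infer_instance

def pvWitness_cook_time : List (List Int) := [[3, 1], [0], [3], [5, 9], [0, 2]]

def Spec_cook_time (pieces : List (List Int)) (out : Int) : Prop := out = cook_time_alt pieces
instance (pieces : List (List Int)) (out : Int) : Decidable (Spec_cook_time pieces out) := by
  unfold Spec_cook_time; infer_instance

-- ===== CLAIM (what is proved, stated in full; the proofs are below) =====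
def Claim_equal_cook_time : Prop :=
  ∀ (pieces : List (List Int)), Dom_cook_time pieces → Pre_cook_time pieces →
    Spec_cook_time pieces (cook_time pieces)

-- ===== LEMMAS AND PROOFS =====

-- the first element of a piece, as both ports read it
def pvHd (p : List Int) : Int := PySem.List.pyGetD p 0 0

theorem pvHd_headD (p : List Int) (h : p ≠ []) : pvHd p = p.headD 0 := by
  match p with
  | x :: xs => simp [pvHd, PySem.List.pyGetD_zero_cons]

-- the running-minimum fold of get_min_t, over the tail
def pvMinFold (t : List (List Int)) (a : Int) : Int :=
  t.foldl (fun mn p => if pvHd p < mn then pvHd p else mn) a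

theorem pvMinFold_spec (t : List (List Int)) (a : Int) :
    (pvMinFold t a = a ∨ ∃ p ∈ t, pvMinFold t a = pvHd p) ∧
      pvMinFold t a ≤ a ∧ ∀ p ∈ t, pvMinFold t a ≤ pvHd p := by
  induction t generalizing a with
  | nil => exact ⟨Or.inl rfl, le_refl _, by simp⟩
  | cons q t ih =>
    have hstep : pvMinFold (q :: t) a = pvMinFold t (if pvHd q < a then pvHd q else a) := rfl
    obtain ⟨hm, hle, hall⟩ := ih (if pvHd q < a then pvHd q else a)
    refine ⟨?_, ?_, ?_⟩
    · rcases hm with h | ⟨p, hp, h⟩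
      · by_cases hq : pvHd q < a
        · exact Or.inr ⟨q, by simp, by rw [hstep, h, if_pos hq]⟩
        · exact Or.inl (by rw [hstep, h, if_neg hq])
      · exact Or.inr ⟨p, by simp [hp], by rw [hstep, h]⟩
    · rw [hstep]; split_ifs at hle ⊢ with h <;> omega
    · intro p hp
      rcases List.mem_cons.mp hp with h | h
      · subst h; rw [hstep]; split_ifs at hle ⊢ with h <;> omega
      · exact hstep ▸ hall p h

theorem get_min_eq (r : List Int) (t : List (List Int)) :
    get_min_t (r :: t) = pvMinFold t (pvHd r) := by
  unfold get_min_t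
  rw [PySem.List.foldl_pyRange_pyGetD (r :: t) []
    (fun mn p => if PySem.List.pyGetD p 0 0 < mn then PySem.List.pyGetD p 0 0 else mn)
    _ (a := 1) (by norm_num)]
  simp [pvMinFold, pvHd, PySem.List.pyGetD_zero_cons]

-- get_min_t computes the minimum of the heads
theorem get_min_spec (rest : List (List Int)) (h : rest ≠ []) :
    get_min_t rest ∈ rest.map pvHd ∧ ∀ x ∈ rest.map pvHd, get_min_t rest ≤ x := by
  match rest with
  | r :: t =>
    rw [get_min_eq]
    obtain ⟨hm, hle, hall⟩ := pvMinFold_spec t (pvHd r)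
    constructor
    · rcases hm with h | ⟨p, hp, h⟩
      · rw [h]; simp
      · rw [h]; simp; exact Or.inr ⟨p, hp, rfl⟩
    · intro x hx
      simp only [List.map_cons, List.mem_cons, List.mem_map] at hx
      rcases hx with h | ⟨p, hp, h⟩
      · omega
      · rw [← h]; exact hall p hp

theorem remove_getD_erase (acc : List (List Int)) (i : List Int) :
    (PySem.List.remove? acc i).getD acc = acc.erase i := by
  by_cases h : i ∈ acc
  · rw [PySem.List.remove?_eq_some_erase acc i h]; rfl
  · rw [(PySem.List.remove?_eq_none_iff acc i).mpr h, List.erase_of_not_mem h]; rfl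

theorem filter_erase_of_neg {α : Type} [BEq α] [LawfulBEq α] (p : α → Bool) (a : α)
    (l : List α) (hp : p a = false) : (l.erase a).filter p = l.filter p := by
  induction l with
  | nil => rfl
  | cons b t ih =>
    rw [List.erase_cons]
    by_cases hb : b = a
    · subst hb; simp [hp]
    · rw [if_neg (by simpa using hb), List.filter_cons, List.filter_cons]
      by_cases hpb : p b = true <;> simp [hpb, ih]

-- the remove loop of drop_p, on any accumulator whose matching pieces occur
-- at most as often as in the remaining iteration list
theorem drop_aux (m : Int) (l acc : List (List Int))
    (h : ∀ x : List Int, pvHd x = m → acc.count x ≤ l.count x) :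
    l.foldl
        (fun acc i =>
          if m == PySem.List.pyGetD i 0 0 then (PySem.List.remove? acc i).getD acc else acc)
        acc
      = acc.filter (fun p => !(m == pvHd p)) := by
  induction l generalizing acc with
  | nil =>
    rw [List.foldl_nil, List.filter_eq_self.mpr]
    intro p hp
    simp only [Bool.not_eq_eq_eq_not, Bool.not_true, beq_eq_false_iff_ne, ne_eq]
    intro he
    have h1 : 1 ≤ acc.count p := List.one_le_count_iff.mpr hp
    have := h p he.symm
    simp at this; omega
  | cons i l ih =>
    rw [List.foldl_cons]
    by_cases hm : m = pvHd i
    · rw [if_pos (by simpa [pvHd] using hm), remove_getD_erase]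
      rw [ih (acc.erase i) ?_]
      · exact filter_erase_of_neg (fun p => !(m == pvHd p)) i acc (by simp [hm])
      · intro x hx
        have hc := h x hx
        rw [List.count_cons] at hc
        rw [List.count_erase]
        by_cases hxi : x = i <;> simp [hxi] at hc ⊢ <;> omega
    · rw [if_neg (by simp [pvHd] at hm ⊢; exact hm)]
      apply ih
      intro x hx
      have hc := h x hx
      rw [List.count_cons] at hc
      have : ¬ (i = x) := fun he => hm (by rw [← hx, he])
      simp [this] at hc
      exact hc

-- drop_p removes exactly the pieces whose head equals t_min
theorem drop_p_spec (m : Int) (rest : List (List Int)) :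
    drop_p m rest = rest.filter (fun p => !(m == pvHd p)) :=
  drop_aux m rest rest (fun _ _ => le_refl _)

-- running max of the heads, seeded with s (the fuel measure)
def pvMaxHd (rest : List (List Int)) (s : Int) : Int :=
  rest.foldl (fun a p => max a (pvHd p)) s

theorem pvMaxHd_max (t : List (List Int)) (a b : Int) :
    pvMaxHd t (max a b) = max (pvMaxHd t a) b := by
  induction t generalizing a with
  | nil => rfl
  | cons p t ih =>
    simp only [pvMaxHd, List.foldl_cons] at *
    rw [show max (max a b) (pvHd p) = max (max a (pvHd p)) b by omega]
    exact ih (max a (pvHd p))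

theorem pvMaxHd_le (t : List (List Int)) (s B : Int) (hs : s ≤ B)
    (h : ∀ p ∈ t, pvHd p ≤ B) : pvMaxHd t s ≤ B := by
  induction t generalizing s with
  | nil => exact hs
  | cons p t ih =>
    simp only [pvMaxHd, List.foldl_cons]
    exact ih (max s (pvHd p)) (by have := h p (by simp); omega)
      (fun q hq => h q (by simp [hq]))

theorem pvMaxHd_bounds (t : List (List Int)) (s : Int) :
    s ≤ pvMaxHd t s ∧ ∀ p ∈ t, pvHd p ≤ pvMaxHd t s :=
  PySem.List.le_foldl_max_int t pvHd s

-- the set of distinct heads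
def pvK (rest : List (List Int)) : Finset Int := (rest.map pvHd).toFinset

-- A's loop adds the number of distinct heads, given enough fuel and heads ≥ sum_t
theorem loopA_correct (fuel : Nat) (sum_t : Int) (rest : List (List Int)) (cnt : Int)
    (hinv : ∀ p ∈ rest, sum_t ≤ pvHd p)
    (hfuel : rest.length + (pvMaxHd rest sum_t - sum_t).toNat < fuel) :
    cook_time_loop fuel sum_t rest cnt = cnt + (pvK rest).card := by
  induction fuel generalizing sum_t rest cnt with
  | zero => omega
  | succ fuel ih =>
    match rest with
    | [] => simp [cook_time_loop, pvK]
    | r :: t =>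
      obtain ⟨hmem, hmin⟩ := get_min_spec (r :: t) (by simp)
      have hb := pvMaxHd_bounds (r :: t) sum_t
      rw [cook_time_loop, if_pos (by simp)]
      simp only []
      obtain ⟨q, hq, hqm⟩ := List.mem_map.mp hmem
      have hsm : sum_t ≤ get_min_t (r :: t) := hqm ▸ hinv q hq
      by_cases he : sum_t = get_min_t (r :: t)
      · rw [if_pos (by simpa using he)]
        rw [drop_p_spec]
        set rest' := (r :: t).filter (fun p => !(sum_t == pvHd p)) with hrest'
        have hlen : rest'.length < (r :: t).length := by
          apply List.length_filter_lt_length_iff_exists.mpr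
          exact ⟨q, hq, by simp [hqm, ← he]⟩
        have hmax : pvMaxHd rest' sum_t ≤ pvMaxHd (r :: t) sum_t :=
          pvMaxHd_le _ _ _ hb.1 (fun p hp => hb.2 p (List.mem_of_mem_filter hp))
        rw [ih sum_t rest' (cnt + 1)
          (fun p hp => hinv p (List.mem_of_mem_filter hp))
          (by omega)]
        have hKmap : rest'.map pvHd = ((r :: t).map pvHd).filter (fun x => !(sum_t == x)) := by
          rw [hrest']
          exact (List.filter_map (f := pvHd) (p := fun x => !(sum_t == x)) (l := r :: t)).symm
        have hK : pvK rest' = (pvK (r :: t)).erase sum_t := by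
          unfold pvK
          rw [hKmap, List.toFinset_filter]
          ext x
          simp only [Finset.mem_filter, Finset.mem_erase, Bool.not_eq_eq_eq_not,
            Bool.not_true, beq_eq_false_iff_ne, ne_eq]
          tauto
        have hmemK : sum_t ∈ pvK (r :: t) := by
          unfold pvK; rw [List.mem_toFinset]; rw [he, ← hqm]; exact List.mem_map_of_mem hq
        rw [hK, Finset.card_erase_of_mem hmemK]
        have : 0 < (pvK (r :: t)).card := Finset.card_pos.mpr ⟨sum_t, hmemK⟩
        omega
      · rw [if_neg (by simpa using he)]
        have hlt : sum_t < get_min_t (r :: t) := lt_of_le_of_ne hsm he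
        have hinv' : ∀ p ∈ r :: t, sum_t + 1 ≤ pvHd p := by
          intro p hp
          have := hmin (pvHd p) (List.mem_map_of_mem hp)
          omega
        have hmaxeq : pvMaxHd (r :: t) (sum_t + 1) = pvMaxHd (r :: t) sum_t := by
          have h1 : pvMaxHd (r :: t) (max sum_t (sum_t + 1)) = max (pvMaxHd (r :: t) sum_t) (sum_t + 1) :=
            pvMaxHd_max (r :: t) sum_t (sum_t + 1)
          rw [show max sum_t (sum_t + 1) = sum_t + 1 by omega] at h1
          have h2 : sum_t + 1 ≤ pvMaxHd (r :: t) sum_t := by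
            have := hb.2 q hq
            have := hinv' q hq
            omega
          omega
        have h3 : sum_t + 1 ≤ pvMaxHd (r :: t) sum_t := by
          have := hb.2 q hq; have := hinv' q hq; omega
        exact ih (sum_t + 1) (r :: t) cnt hinv' (by rw [hmaxeq]; omega)

-- B's adjacent-difference pass counts the distinct values of a sorted list
theorem adj_count (t : List Int) (a : Int) (hs : (a :: t).Pairwise (· ≤ ·)) :
    1 + (((a :: t).zip t).filter (fun ab => !(ab.1 == ab.2))).length
      = (a :: t).toFinset.card := by
  induction t generalizing a with
  | nil => simp
  | cons b t ih =>
    rw [List.pairwise_cons] at hs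
    obtain ⟨ha, hs'⟩ := hs
    have hzip : (a :: b :: t).zip (b :: t) = (a, b) :: ((b :: t).zip t) := rfl
    rw [hzip, List.filter_cons]
    by_cases hab : a = b
    · rw [if_neg (by simp [hab])]
      rw [ih b hs']
      subst hab
      simp [List.toFinset_cons]
    · rw [if_pos (by simp [hab])]
      have hnm : a ∉ (b :: t) := by
        intro hmem
        rcases List.pairwise_cons.mp hs' with ⟨hb, _⟩
        have hab' : a < b := lt_of_le_of_ne (ha b (by simp)) hab
        rcases List.mem_cons.mp hmem with h | h
        · exact hab (by omega)
        · have := hb a h; omega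
      rw [List.toFinset_cons, Finset.card_insert_of_notMem (by simpa using hnm), ← ih b hs']
      simp [List.length_cons]
      omega

-- A's value on Pre_: the number of distinct heads
theorem cook_time_eq_card (pieces : List (List Int))
    (hpre : ∀ p ∈ pieces, p ≠ [] ∧ 0 ≤ p.headD 0) :
    cook_time pieces = (pvK pieces).card := by
  unfold cook_time
  have hinv : ∀ p ∈ pieces, (0 : Int) ≤ pvHd p := by
    intro p hp
    rw [pvHd_headD p (hpre p hp).1]
    exact (hpre p hp).2
  have hS : pvMaxHd pieces 0 ≤ ((((pieces.map (fun p => (PySem.List.pyGetD p 0 0).natAbs)).sum : Nat)) : Int) := by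
    apply pvMaxHd_le _ _ _ (Int.natCast_nonneg _)
    intro p hp
    have h1 : pvHd p ≤ ((pvHd p).natAbs : Int) := Int.le_natAbs
    have h2 : (pvHd p).natAbs ≤ (pieces.map (fun p => (PySem.List.pyGetD p 0 0).natAbs)).sum := by
      apply List.single_le_sum (fun x _ => Nat.zero_le x)
      exact List.mem_map_of_mem hp
    calc pvHd p ≤ ((pvHd p).natAbs : Int) := h1
      _ ≤ _ := Nat.cast_le.mpr h2
  rw [loopA_correct _ 0 pieces 0 hinv (by omega)]
  omega

-- B's value everywhere: the number of distinct heads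
theorem cook_time_alt_eq_card (pieces : List (List Int)) :
    cook_time_alt pieces = (pvK pieces).card := by
  have hperm : (PySem.List.sorted (pieces.map (fun p => PySem.List.pyGetD p 0 0)) (fun x => x) false).Perm
      (pieces.map (fun p => PySem.List.pyGetD p 0 0)) := PySem.List.sorted_perm _ _ _
  have hKeq : (pieces.map (fun p => PySem.List.pyGetD p 0 0)).toFinset = pvK pieces := rfl
  unfold cook_time_alt
  cases hk : PySem.List.sorted (pieces.map (fun p => PySem.List.pyGetD p 0 0)) (fun x => x) false with
  | nil =>
    rw [hk] at hperm
    have : pieces.map (fun p => PySem.List.pyGetD p 0 0) = [] := hperm.symm.eq_nil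
    simp [← hKeq, this]
  | cons k ks =>
    have hpw : (k :: ks).Pairwise (· ≤ ·) := by
      have := PySem.List.sorted_pairwise (pieces.map (fun p => PySem.List.pyGetD p 0 0)) (fun x => x)
      rw [hk] at this
      exact this
    have hadj := adj_count ks k hpw
    have hTF : (k :: ks).toFinset = pvK pieces := by
      rw [← hKeq]
      exact List.toFinset_eq_of_perm _ _ (hk ▸ hperm)
    simp only [PySem.List.slice_from_one, List.tail_cons]
    rw [← hTF, ← hadj]
    push_cast
    ring

-- ===== VERDICT (by name: the statement is the Claim_ definition above) =====
theorem cook_time_spec : Claim_equal_cook_time := by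
  intro pieces _ hpre
  unfold Spec_cook_time
  rw [cook_time_eq_card pieces hpre, cook_time_alt_eq_card pieces]
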